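-- pv_equiv track=rewrite | github.com/cjrl/Python-Subleq | subleq_parser.py | expand_literals
-- ===== SOURCE A (Python) =====
-- def expand_literals(string):
--     in_literal = False
--     expanded_string = ""
--     for char in string:
--         if char is '"' or char is "'":
--             in_literal ^=True
--         elif in_literal:
--             expanded_string += str(ord(char)) + ' '
--         else:
--             expanded_string += char
--     return expanded_string
-- ===== SOURCE B (Python) =====
-- def expand_literals(string):
--     parts = string.replace('"', "'").split("'")
--     pieces = []
--     for i, part in enumerate(parts):
--         if i % 2 == 1:
--             pieces.append(''.join(str(ord(c)) + ' ' for c in part))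
--         else:
--             pieces.append(part)
--     return ''.join(pieces)
-- ===== Notes on version B (the rewrite author's own statement) =====
-- stated objective: alternative
-- what changed: Replaced the single-pass boolean-flag toggle with a tokenize-then-transform pass: normalise both quote characters to one, split on it, expand odd-indexed (inside-literal) segments and keep even-indexed ones verbatim, joining the pieces once at the end.
import Mathlib
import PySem

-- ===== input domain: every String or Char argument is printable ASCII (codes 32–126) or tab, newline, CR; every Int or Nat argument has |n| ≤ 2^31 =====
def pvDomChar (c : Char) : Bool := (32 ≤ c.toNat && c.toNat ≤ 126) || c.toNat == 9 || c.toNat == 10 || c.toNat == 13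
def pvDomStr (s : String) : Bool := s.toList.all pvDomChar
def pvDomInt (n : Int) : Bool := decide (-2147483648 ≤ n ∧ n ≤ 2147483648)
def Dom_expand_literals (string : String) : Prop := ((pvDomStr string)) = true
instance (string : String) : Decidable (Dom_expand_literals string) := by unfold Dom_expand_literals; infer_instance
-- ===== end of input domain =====

-- B replaces A's single-pass boolean-flag toggle by a tokenize-then-transform decomposition
-- (normalise quotes, split, expand odd-indexed segments, join); objective: alternative structure.

-- ===== PORT A =====
-- A's loop: state is (in_literal, expanded_string); strings handled as List Char (PySem convention).
def expand_literals (string : String) : String :=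
  let r := string.toList.foldl
    (fun (st : Bool × List Char) char =>
      if char = '"' ∨ char = '\'' then (xor st.1 true, st.2)
      else if st.1 = true then (st.1, st.2 ++ PySem.Int.toChars (char.toNat : Int) ++ [' '])
      else (st.1, st.2 ++ [char]))
    (false, ([] : List Char))
  String.ofList r.2

-- ===== PORT B =====
-- ''.join(str(ord(c)) + ' ' for c in part)
def pvEncode (part : List Char) : List Char :=
  PySem.Chars.join [] (part.map (fun c => PySem.Int.toChars (c.toNat : Int) ++ [' ']))

def expand_literals_alt (string : String) : String :=
  let parts := PySem.Chars.splitOn (PySem.Chars.replace string.toList ['"'] ['\'']) ['\'']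
  let pieces := (PySem.List.enumerate parts 0).map
    (fun p => if PySem.Int.mod p.1 2 = 1 then pvEncode p.2 else p.2)
  String.ofList (PySem.Chars.join [] pieces)

-- ===== PRECONDITION & SPEC =====
def Spec_expand_literals (string : String) (out : String) : Prop := out = expand_literals_alt string
instance (string : String) (out : String) : Decidable (Spec_expand_literals string out) := by unfold Spec_expand_literals; infer_instance

-- ===== CLAIM (what is proved, stated in full; the proofs are below) =====
def Claim_equal_expand_literals : Prop := ∀ (string : String), Dom_expand_literals string → Spec_expand_literals string (expand_literals string)

-- ===== LEMMAS AND PROOFS =====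

-- proof-only helpers
def pvSwap (c : Char) : Char := if c = '"' then '\'' else c

def pvSplitCh (l : List Char) : List (List Char) :=
  match l with
  | [] => [[]]
  | c :: t =>
    if c = '\'' then [] :: pvSplitCh t
    else
      match pvSplitCh t with
      | [] => [[c]]
      | s :: ss => (c :: s) :: ss

def pvAltP (b : Bool) (parts : List (List Char)) : List Char :=
  match parts with
  | [] => []
  | s :: ss => (if b then pvEncode s else s) ++ pvAltP (!b) ss

lemma pvJoin_nil (xs : List (List Char)) : PySem.Chars.join [] xs = xs.flatten := by
  simp only [PySem.Chars.join, List.intercalate]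
  induction xs with
  | nil => rfl
  | cons a t ih => cases t <;> simp_all [List.intersperse]

lemma pvSplitCh_ne_nil (l : List Char) : pvSplitCh l ≠ [] := by
  cases l with
  | nil => simp [pvSplitCh]
  | cons c t =>
    simp only [pvSplitCh]
    split
    · simp
    · split <;> simp

-- replace.go with single-char old/new is a map
lemma pvReplace_go (fuel : Nat) (l acc : List Char) (h : l.length ≤ fuel) :
    PySem.Chars.replace.go ['"'] ['\''] fuel l acc = acc.reverse ++ l.map pvSwap := by
  induction fuel generalizing l acc with
  | zero =>
    have : l = [] := by cases l <;> simp_all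
    subst this; simp [PySem.Chars.replace.go]
  | succ n ih =>
    cases l with
    | nil => simp [PySem.Chars.replace.go]
    | cons c t =>
      by_cases hc : c = '"'
      · subst hc
        rw [PySem.Chars.replace.go]
        simp only [List.isPrefixOf, Bool.and_true, beq_self_eq_true, if_pos]
        rw [ih]
        · simp [pvSwap]
        · simpa using Nat.le_of_succ_le_succ h
      · rw [PySem.Chars.replace.go]
        have : (['"'].isPrefixOf (c :: t)) = false := by
          simp [List.isPrefixOf]
          exact Ne.symm hc
        rw [this]
        simp only [Bool.false_eq_true, if_false]
        rw [ih t (c :: acc) (by simpa using Nat.le_of_succ_le_succ h)]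
        simp [pvSwap, hc]

lemma pvReplace_eq_map (l : List Char) :
    PySem.Chars.replace l ['"'] ['\''] = l.map pvSwap := by
  simp only [PySem.Chars.replace]
  rw [if_neg (by simp)]
  simpa using pvReplace_go l.length l [] le_rfl

-- splitOn.go with a single-char separator computes pvSplitCh
lemma pvSplit_go (fuel : Nat) (l cur : List Char) (acc : List (List Char)) (h : l.length ≤ fuel) :
    PySem.Chars.splitOn.go ['\''] fuel l cur acc =
      acc.reverse ++ (cur.reverse ++ (pvSplitCh l).headI) :: (pvSplitCh l).tail := by
  induction fuel generalizing l cur acc with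
  | zero =>
    have : l = [] := by cases l <;> simp_all
    subst this; simp [PySem.Chars.splitOn.go, pvSplitCh]
  | succ n ih =>
    cases l with
    | nil => simp [PySem.Chars.splitOn.go, pvSplitCh]
    | cons c t =>
      by_cases hc : c = '\''
      · subst hc
        rw [PySem.Chars.splitOn.go]
        simp only [List.isPrefixOf, Bool.and_true, beq_self_eq_true, if_pos]
        simp only [List.length_singleton, List.drop_one, List.tail_cons]
        rw [ih t [] (cur.reverse :: acc) (by simpa using Nat.le_of_succ_le_succ h)]
        simp only [pvSplitCh, if_pos, List.reverse_cons, List.append_assoc, List.nil_append,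
          List.headI, List.tail, List.reverse_nil]
        cases ht : pvSplitCh t with
        | nil => exact absurd ht (pvSplitCh_ne_nil t)
        | cons s ss => simp
      · rw [PySem.Chars.splitOn.go]
        have : (['\''].isPrefixOf (c :: t)) = false := by
          simp [List.isPrefixOf]
          exact Ne.symm hc
        rw [this]
        simp only [Bool.false_eq_true, if_false]
        rw [ih t (c :: cur) acc (by simpa using Nat.le_of_succ_le_succ h)]
        cases ht : pvSplitCh t with
        | nil => exact absurd ht (pvSplitCh_ne_nil t)
        | cons s ss => simp [pvSplitCh, hc, ht]

lemma pvSplitOn_eq (l : List Char) :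
    PySem.Chars.splitOn l ['\''] = pvSplitCh l := by
  simp only [PySem.Chars.splitOn]
  rw [pvSplit_go (l.length + 1) l [] [] (Nat.le_succ _)]
  cases h : pvSplitCh l with
  | nil => exact absurd h (pvSplitCh_ne_nil l)
  | cons s ss => simp

-- B's enumerate-parity map-then-join equals the alternating recursion pvAltP
lemma pvEnum_altP (parts : List (List Char)) (i : Nat) :
    ((PySem.List.enumerate parts (i : Int)).map
      (fun p => if PySem.Int.mod p.1 2 = 1 then pvEncode p.2 else p.2)).flatten =
    pvAltP (i % 2 == 1) parts := by
  induction parts generalizing i with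
  | nil => simp [PySem.List.enumerate_nil, pvAltP]
  | cons s ss ih =>
    rw [PySem.List.enumerate_cons]
    have hmod : PySem.Int.mod (i : Int) 2 = ((i % 2 : Nat) : Int) := PySem.Int.mod_natCast i 2
    have : ((i : Int) + 1) = ((i + 1 : Nat) : Int) := by push_cast; ring
    rw [List.map_cons, List.flatten_cons, this, ih]
    simp only [pvAltP, hmod]
    congr 1
    · rcases Nat.mod_two_eq_zero_or_one i with h | h <;> simp [h]
    · rcases Nat.mod_two_eq_zero_or_one i with h | h <;>
        simp [Nat.add_mod, h]

lemma pvEnum_altP0 (parts : List (List Char)) :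
    ((PySem.List.enumerate parts 0).map
      (fun p => if PySem.Int.mod p.1 2 = 1 then pvEncode p.2 else p.2)).flatten =
    pvAltP false parts := by
  have h := pvEnum_altP parts 0
  simpa using h

-- core: A's fold over l equals pvAltP over pvSplitCh of the quote-normalised l
lemma pvCore (l : List Char) (b : Bool) (acc : List Char) :
    (l.foldl
      (fun (st : Bool × List Char) char =>
        if char = '"' ∨ char = '\'' then (xor st.1 true, st.2)
        else if st.1 = true then (st.1, st.2 ++ PySem.Int.toChars (char.toNat : Int) ++ [' '])
        else (st.1, st.2 ++ [char]))
      (b, acc)).2 = acc ++ pvAltP b (pvSplitCh (l.map pvSwap)) := by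
  induction l generalizing b acc with
  | nil => cases b <;> simp [pvSplitCh, pvAltP, pvEncode, PySem.Chars.join, List.intercalate]
  | cons c t ih =>
    by_cases hq : c = '"' ∨ c = '\''
    · have hsw : pvSwap c = '\'' := by
        rcases hq with h | h <;> simp [pvSwap, h]
      rw [List.foldl_cons, if_pos hq, ih]
      simp only [List.map_cons, hsw, pvSplitCh, if_pos, pvAltP]
      have he : pvEncode ([] : List Char) = [] := by
        simp [pvEncode, PySem.Chars.join, List.intercalate]
      cases b <;> simp [he]
    · have hsw : pvSwap c = c := by
        simp only [pvSwap]; rw [if_neg]; intro h; exact hq (Or.inl h)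
      have hcq : c ≠ '\'' := fun h => hq (Or.inr h)
      rw [List.foldl_cons, if_neg hq]
      have hsplit : pvSplitCh (c :: t.map pvSwap) =
          (c :: (pvSplitCh (t.map pvSwap)).headI) :: (pvSplitCh (t.map pvSwap)).tail := by
        cases ht : pvSplitCh (t.map pvSwap) with
        | nil => exact absurd ht (pvSplitCh_ne_nil _)
        | cons s ss => simp [pvSplitCh, hcq, ht]
      have hcons : pvSplitCh (t.map pvSwap) =
          (pvSplitCh (t.map pvSwap)).headI :: (pvSplitCh (t.map pvSwap)).tail := by
        cases ht : pvSplitCh (t.map pvSwap) with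
        | nil => exact absurd ht (pvSplitCh_ne_nil _)
        | cons s ss => simp
      cases b with
      | false =>
        rw [if_neg (by simp), ih, List.map_cons, hsw, hsplit]
        conv_lhs => rw [hcons]
        simp [pvAltP]
      | true =>
        rw [if_pos rfl, ih, List.map_cons, hsw, hsplit]
        conv_lhs => rw [hcons]
        have henc : pvEncode (c :: (pvSplitCh (t.map pvSwap)).headI) =
            (PySem.Int.toChars (c.toNat : Int) ++ [' ']) ++
              pvEncode ((pvSplitCh (t.map pvSwap)).headI) := by
          simp [pvEncode, pvJoin_nil]
        simp [pvAltP, henc]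

-- ===== VERDICT (by name: the statement is the Claim_ definition above) =====
theorem expand_literals_spec : Claim_equal_expand_literals := by
  intro s _
  unfold Spec_expand_literals expand_literals expand_literals_alt
  simp only [pvReplace_eq_map, pvSplitOn_eq, pvJoin_nil, pvEnum_altP0,
    pvCore, List.nil_append]
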